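-- pv_equiv track=rewrite | github.com/MatrixFounder/Universal-skills | skills/xlsx/scripts/xlsx_read/_tables.py | _split_on_gap
-- ===== SOURCE A (Python) =====
-- def _split_on_gap(
--     occupied: list[bool], gap: int, base_index: int = 1
-- ) -> list[tuple[int, int]]:
--     """Find runs of occupied indices, splitting on `gap`-or-more empties.
--
--     Returns list of (start, end) inclusive in the **absolute** index
--     space defined by `base_index` (so e.g. row 1-based or col 1-based
--     can be returned without renumbering at the call site).
--
--     A gap of *exactly* `gap` empties splits — e.g. `gap=2` splits on
--     `[True, False, False, True]` (2 empties = split) but NOT on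
--     `[True, False, True]` (1 empty < 2 = same band).
--     """
--     out: list[tuple[int, int]] = []
--     run_start: int | None = None
--     empty_run = 0
--     for i, occ in enumerate(occupied):
--         if occ:
--             if run_start is None:
--                 run_start = i
--             empty_run = 0
--         else:
--             if run_start is not None:
--                 empty_run += 1
--                 if empty_run >= gap:
--                     out.append((base_index + run_start, base_index + i - empty_run))
--                     run_start = None
--                     empty_run = 0
--     if run_start is not None:
--         out.append((base_index + run_start, base_index + len(occupied) - 1 - empty_run))
--     return out
-- ===== SOURCE B (Python) =====
-- def _split_on_gap(
--     occupied: list[bool], gap: int, base_index: int = 1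
-- ) -> list[tuple[int, int]]:
--     """Build maximal True-runs first, then coalesce runs separated by
--     fewer than `gap` empties into bands, then shift by base_index."""
--     # pass 1: maximal runs of True, as inclusive (start, end) index pairs
--     runs = []
--     open_start = None
--     for i, occ in enumerate(occupied):
--         if occ:
--             if open_start is None:
--                 open_start = i
--         else:
--             if open_start is not None:
--                 runs.append((open_start, i - 1))
--                 open_start = None
--     if open_start is not None:
--         runs.append((open_start, len(occupied) - 1))
--     # pass 2: merge a run into the previous band when the empty stretch
--     # between them is strictly shorter than `gap`
--     bands = []
--     for s, e in runs:
--         if bands and s - bands[-1][1] - 1 < gap: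
--             bands[-1] = (bands[-1][0], e)
--         else:
--             bands.append((s, e))
--     return [(base_index + s, base_index + e) for s, e in bands]
-- ===== Notes on version B (the rewrite author's own statement) =====
-- stated objective: alternative
-- what changed: Replaces the inline empty-counter state machine with a two-pass build-runs-then-coalesce decomposition: pass 1 collects maximal True-runs as (start,end) pairs, pass 2 merges consecutive runs whose separating empty stretch is shorter than gap, then shifts by base_index.
import Mathlib
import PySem

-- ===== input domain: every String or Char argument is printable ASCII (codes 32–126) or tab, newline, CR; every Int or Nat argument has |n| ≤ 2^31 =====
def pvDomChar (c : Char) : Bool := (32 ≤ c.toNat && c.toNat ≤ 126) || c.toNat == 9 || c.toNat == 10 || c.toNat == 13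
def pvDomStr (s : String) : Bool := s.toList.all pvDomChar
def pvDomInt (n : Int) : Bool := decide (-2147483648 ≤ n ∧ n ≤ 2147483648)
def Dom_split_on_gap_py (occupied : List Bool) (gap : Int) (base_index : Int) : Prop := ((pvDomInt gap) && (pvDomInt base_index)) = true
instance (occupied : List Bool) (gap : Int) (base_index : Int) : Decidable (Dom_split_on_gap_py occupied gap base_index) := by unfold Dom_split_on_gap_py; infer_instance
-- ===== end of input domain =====

-- B replaces A's inline empty-counter state machine by a build-runs-then-coalesce
-- two-pass decomposition (objective: alternative, same O(n) cost).

-- ===== PORT A =====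
-- A's for-loop over enumerate(occupied) as structural recursion carrying the same
-- state (out, run_start, empty_run) and the running index i; the [] case is A's
-- trailing-run epilogue (there i = len(occupied)).
def loopA (gap base_index : Int) : List Bool → Int → List (Int × Int) → Option Int → Int → List (Int × Int)
  | [], i, out, rs, er =>
      match rs with
      | none => out
      | some s => out ++ [(base_index + s, base_index + i - 1 - er)]
  | occ :: rest, i, out, rs, er =>
      if occ then
        loopA gap base_index rest (i + 1) out (some (rs.getD i)) 0
      else
        match rs with
        | none => loopA gap base_index rest (i + 1) out none er
        | some s =>
            if er + 1 ≥ gap then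
              loopA gap base_index rest (i + 1) (out ++ [(base_index + s, base_index + i - (er + 1))]) none 0
            else
              loopA gap base_index rest (i + 1) out (some s) (er + 1)

def split_on_gap_py (occupied : List Bool) (gap : Int) (base_index : Int) : List (Int × Int) :=
  loopA gap base_index occupied 0 [] none 0

-- ===== PORT B =====
-- pass 1 of Source B: maximal runs of True as inclusive (start, end) index pairs;
-- state (runs, open_start), [] case is the close-trailing-run epilogue (i = len).
def pass1B : List Bool → Int → List (Int × Int) → Option Int → List (Int × Int)
  | [], i, runs, opn =>
      match opn with
      | none => runs
      | some s => runs ++ [(s, i - 1)]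
  | occ :: rest, i, runs, opn =>
      if occ then
        pass1B rest (i + 1) runs (some (opn.getD i))
      else
        match opn with
        | none => pass1B rest (i + 1) runs none
        | some s => pass1B rest (i + 1) (runs ++ [(s, i - 1)]) none

-- pass 2 of Source B: coalesce runs separated by fewer than `gap` empties into bands.
def pass2B (gap : Int) : List (Int × Int) → List (Int × Int) → List (Int × Int)
  | [], bands => bands
  | (s, e) :: rest, bands =>
      match bands.getLast? with
      | some (bs, be) =>
          if s - be - 1 < gap then pass2B gap rest (bands.dropLast ++ [(bs, e)])
          else pass2B gap rest (bands ++ [(s, e)])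
      | none => pass2B gap rest (bands ++ [(s, e)])

def split_on_gap_py_alt (occupied : List Bool) (gap : Int) (base_index : Int) : List (Int × Int) :=
  (pass2B gap (pass1B occupied 0 [] none) []).map (fun p => (base_index + p.1, base_index + p.2))

-- ===== PRECONDITION & SPEC =====
def Spec_split_on_gap_py (occupied : List Bool) (gap : Int) (base_index : Int) (out : List (Int × Int)) : Prop := out = split_on_gap_py_alt occupied gap base_index
instance (occupied : List Bool) (gap : Int) (base_index : Int) (out : List (Int × Int)) : Decidable (Spec_split_on_gap_py occupied gap base_index out) := by unfold Spec_split_on_gap_py; infer_instance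

-- ===== CLAIM (what is proved, stated in full; the proofs are below) =====
def Claim_equal_split_on_gap_py : Prop := ∀ (occupied : List Bool) (gap : Int) (base_index : Int), Dom_split_on_gap_py occupied gap base_index → Spec_split_on_gap_py occupied gap base_index (split_on_gap_py occupied gap base_index)

-- ===== LEMMAS AND PROOFS =====

-- where pass2B's step sends the next run: (surviving bands, start of the updated last band)
def mergeBase (gap : Int) (bands : List (Int × Int)) (s0 : Int) : List (Int × Int) × Int :=
  match bands.getLast? with
  | none => ([], s0)
  | some (bs, be) => if s0 - be - 1 < gap then (bands.dropLast, bs) else (bands, s0)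

lemma pass2B_cons (gap s e : Int) (rest bands : List (Int × Int)) :
    pass2B gap ((s, e) :: rest) bands
      = pass2B gap rest ((mergeBase gap bands s).1 ++ [((mergeBase gap bands s).2, e)]) := by
  cases h : bands.getLast? with
  | none =>
      have hb : bands = [] := List.getLast?_eq_none_iff.mp h
      subst hb
      rfl
  | some p =>
      cases p with
      | mk bs be =>
          conv_lhs => rw [pass2B.eq_def]
          by_cases hm : s - be - 1 < gap
          · simp only [h, mergeBase, if_pos hm]
          · simp only [h, mergeBase, if_neg hm]

lemma pass1B_acc (l : List Bool) : ∀ (i : Int) (acc : List (Int × Int)) (opn : Option Int),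
    pass1B l i acc opn = acc ++ pass1B l i [] opn := by
  induction l with
  | nil => intro i acc opn; cases opn <;> simp [pass1B]
  | cons occ rest ih =>
      intro i acc opn
      by_cases hocc : occ = true
      · simp [pass1B, hocc, ih (i + 1) acc]
      · have : occ = false := by simpa using hocc
        subst this
        cases opn with
        | none => simp [pass1B, ih (i + 1) acc]
        | some s =>
            simp [pass1B, ih (i + 1) (acc ++ [(s, i - 1)]) none, ih (i + 1) [(s, i - 1)] none]

def shiftP (base : Int) (p : Int × Int) : Int × Int := (base + p.1, base + p.2)

-- the simulation invariant between A's state and B's (bands so far, open run)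
def InvSim (gap base i : Int) (out : List (Int × Int)) (rs : Option Int) (er : Int)
    (bands : List (Int × Int)) (opn : Option Int) : Prop :=
  (rs = none ∧ opn = none ∧ er = 0 ∧ out = bands.map (shiftP base) ∧
      (bands = [] ∨ ∃ bs be, bands.getLast? = some (bs, be) ∧ gap ≤ i - be - 1))
  ∨ (∃ s s0 bands', rs = some s ∧ opn = some s0 ∧ er = 0 ∧
      out = bands'.map (shiftP base) ∧ mergeBase gap bands s0 = (bands', s))
  ∨ (∃ s bands', rs = some s ∧ opn = none ∧ 1 ≤ er ∧ er < gap ∧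
      bands = bands' ++ [(s, i - 1 - er)] ∧ out = bands'.map (shiftP base))

lemma sim (gap base : Int) (l : List Bool) : ∀ (i : Int) (out : List (Int × Int)) (rs : Option Int)
    (er : Int) (bands : List (Int × Int)) (opn : Option Int),
    InvSim gap base i out rs er bands opn →
    loopA gap base l i out rs er = (pass2B gap (pass1B l i [] opn) bands).map (shiftP base) := by
  induction l with
  | nil =>
      intro i out rs er bands opn hinv
      rcases hinv with ⟨hrs, hop, her, hout, _⟩ | ⟨s, s0, bands', hrs, hop, her, hout, hmb⟩
        | ⟨s, bands', hrs, hop, _, _, hbands, hout⟩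
      · subst hrs; subst hop; simp [loopA, pass1B, pass2B, hout]
      · subst hrs; subst hop; subst her
        simp only [loopA, pass1B, pass2B, List.nil_append, pass2B_cons, hmb]
        simp [hout, shiftP] <;> omega
      · subst hrs; subst hop
        simp only [loopA, pass1B, pass2B]
        rw [hbands, hout]
        simp [shiftP] <;> omega
  | cons occ rest ih =>
      intro i out rs er bands opn hinv
      by_cases hocc : occ = true
      · subst hocc
        simp only [loopA, pass1B, if_pos rfl]
        rcases hinv with ⟨hrs, hop, her, hout, hcond⟩ | ⟨s, s0, bands', hrs, hop, her, hout, hmb⟩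
          | ⟨s, bands', hrs, hop, her1, herg, hbands, hout⟩
        · subst hrs; subst hop
          apply ih
          refine Or.inr (Or.inl ⟨i, i, bands, rfl, rfl, rfl, by simpa using hout, ?_⟩)
          rcases hcond with hb | ⟨bs, be, hlast, hge⟩
          · subst hb; simp [mergeBase]
          · simp only [mergeBase, hlast]
            rw [if_neg (by omega)]
        · subst hrs; subst hop; subst her
          apply ih
          exact Or.inr (Or.inl ⟨s, s0, bands', rfl, rfl, rfl, hout, hmb⟩)
        · subst hrs; subst hop
          apply ih
          refine Or.inr (Or.inl ⟨s, i, bands', rfl, rfl, rfl, hout, ?_⟩)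
          have hlast : bands.getLast? = some (s, i - 1 - er) := by
            rw [hbands]; simp
          simp only [mergeBase, hlast]
          rw [if_pos (by omega), hbands]
          simp
      · have hocc' : occ = false := by simpa using hocc
        subst hocc'
        rcases hinv with ⟨hrs, hop, her, hout, hcond⟩ | ⟨s, s0, bands', hrs, hop, her, hout, hmb⟩
          | ⟨s, bands', hrs, hop, her1, herg, hbands, hout⟩
        · subst hrs; subst hop; subst her
          simp only [loopA, pass1B, Bool.false_eq_true, if_false, List.nil_append]
          apply ih
          refine Or.inl ⟨rfl, rfl, rfl, hout, ?_⟩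
          rcases hcond with hb | ⟨bs, be, hlast, hge⟩
          · exact Or.inl hb
          · exact Or.inr ⟨bs, be, hlast, by omega⟩
        · subst hrs; subst hop; subst her
          simp only [loopA, pass1B, Bool.false_eq_true, if_false, List.nil_append]
          rw [pass1B_acc rest (i + 1) [(s0, i - 1)] none]
          rw [show ([(s0, i - 1)] ++ pass1B rest (i + 1) [] none : List (Int × Int))
                = (s0, i - 1) :: pass1B rest (i + 1) [] none from rfl]
          rw [pass2B_cons, hmb]
          by_cases hg : (0 : Int) + 1 ≥ gap
          · rw [if_pos hg]
            apply ih
            refine Or.inl ⟨rfl, rfl, rfl, ?_, ?_⟩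
            · rw [hout]; simp [shiftP] <;> omega
            · exact Or.inr ⟨s, i - 1, by simp, by omega⟩
          · rw [if_neg hg]
            apply ih
            refine Or.inr (Or.inr ⟨s, bands', rfl, rfl, by omega, by omega, ?_, hout⟩)
            simp only [List.append_cancel_left_eq, List.cons.injEq, Prod.mk.injEq, and_true, true_and] <;> omega
        · subst hrs; subst hop
          simp only [loopA, pass1B, Bool.false_eq_true, if_false, List.nil_append]
          by_cases hg : er + 1 ≥ gap
          · rw [if_pos hg]
            apply ih
            refine Or.inl ⟨rfl, rfl, rfl, ?_, ?_⟩
            · rw [hbands, hout]; simp [shiftP] <;> omega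
            · refine Or.inr ⟨s, i - 1 - er, ?_, by omega⟩
              rw [hbands]; simp
          · rw [if_neg hg]
            apply ih
            refine Or.inr (Or.inr ⟨s, bands', rfl, rfl, by omega, by omega, ?_, hout⟩)
            rw [hbands]
            simp only [List.append_cancel_left_eq, List.cons.injEq, Prod.mk.injEq, and_true, true_and] <;> omega

-- ===== VERDICT (by name: the statement is the Claim_ definition above) =====
theorem split_on_gap_py_spec : Claim_equal_split_on_gap_py := by
  intro occupied gap base_index _
  show split_on_gap_py occupied gap base_index = split_on_gap_py_alt occupied gap base_index
  unfold split_on_gap_py split_on_gap_py_alt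
  exact sim gap base_index occupied 0 [] none 0 [] none (Or.inl ⟨rfl, rfl, rfl, rfl, Or.inl rfl⟩)
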